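-- pv_equiv track=rewrite | github.com/OSU-NLP-Group/Explorer | evals/miniwob/utils.py | stringfy_selector
-- ===== SOURCE A (Python) =====
-- def stringfy_selector(string: str):
--     special_chars = "#.>+~[]():*^$|=@'"
--     string = string.replace("\t", " ").replace("\n", " ").lstrip().rstrip()
--     string = " ".join(string.split())
--     for char in special_chars:
--         string = string.replace(char, "\\" + char)
--     string = ".".join(string.split(" "))
--     if string[0].isdigit():
--         string = f"\\{'{:X}'.format(ord(string[0]))}" + " " + string[1:]
--     return string
-- ===== SOURCE B (Python) =====
-- def stringfy_selector(string: str):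
--     special_chars = set("#.>+~[]():*^$|=@'")
--     escaped = []
--     for word in string.split():
--         out = []
--         for ch in word:
--             if ch in special_chars:
--                 out.append("\\" + ch)
--             else:
--                 out.append(ch)
--         escaped.append("".join(out))
--     res = ".".join(escaped)
--     if res[0].isdigit():
--         res = "\\" + "{:X}".format(ord(res[0])) + " " + res[1:]
--     return res
-- ===== Notes on version B (the rewrite author's own statement) =====
-- stated objective: alternative
-- what changed: B tokenizes once with str.split() and escapes each word in a single per-character pass, replacing A's tab/newline pre-replaces, lstrip/rstrip, space-rejoin, 17 sequential full-string replace passes and final split-on-space; it trades A's chain of library string passes for one explicit character loop.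
import Mathlib
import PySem

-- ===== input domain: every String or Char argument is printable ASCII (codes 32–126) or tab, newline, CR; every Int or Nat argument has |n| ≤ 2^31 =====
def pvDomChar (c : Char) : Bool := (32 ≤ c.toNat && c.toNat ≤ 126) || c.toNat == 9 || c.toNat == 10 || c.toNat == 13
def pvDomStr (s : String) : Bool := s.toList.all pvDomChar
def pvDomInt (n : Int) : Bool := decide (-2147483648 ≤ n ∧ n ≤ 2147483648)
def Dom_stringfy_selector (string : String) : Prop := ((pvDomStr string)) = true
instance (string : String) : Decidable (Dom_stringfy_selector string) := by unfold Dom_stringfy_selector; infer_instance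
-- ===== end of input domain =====

-- B tokenizes once with str.split() and escapes each word in one explicit per-character pass instead of A's chain of whole-string replace/strip/join passes (alternative decomposition).

-- the special-character string of both programs
def pvSpecials : List Char := ['#', '.', '>', '+', '~', '[', ']', '(', ')', ':', '*', '^', '$', '|', '=', '@', '\'']

-- '{:X}'.format(n), hand port, exact for n ≥ 0 (the argument is always an ord, hence ≥ 0)
def pvHexDigit (n : Nat) : Char := if n < 10 then Char.ofNat (48 + n) else Char.ofNat (55 + n)

def pvHexUpper (n : Nat) : List Char :=
  if n < 16 then [pvHexDigit n]
  else pvHexUpper (n / 16) ++ [pvHexDigit (n % 16)]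
decreasing_by exact Nat.div_lt_self (by omega) (by omega)

-- ===== PORT A =====
def stringfy_selector (string : String) : String :=
  let s0 := string.toList
  let s1 := PySem.Chars.replace s0 ['\t'] [' ']
  let s2 := PySem.Chars.replace s1 ['\n'] [' ']
  let s3 := PySem.Chars.rstrip (PySem.Chars.lstrip s2)
  let s4 := PySem.Chars.join [' '] (PySem.Chars.split₀ s3)
  let s5 := pvSpecials.foldl (fun acc c => PySem.Chars.replace acc [c] ['\\', c]) s4
  let s6 := PySem.Chars.join ['.'] (PySem.Chars.splitOn s5 [' '])
  match PySem.List.pyGet? s6 (0 : Int) with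
  | none => ""   -- Python raises IndexError here; excluded by Pre_
  | some c =>
    if PySem.Chars.strIsdigit [c] then
      String.ofList (['\\'] ++ pvHexUpper c.toNat ++ [' '] ++ PySem.List.slice s6 (some 1) none)
    else String.ofList s6

-- ===== PORT B =====
def stringfy_selector_alt (string : String) : String :=
  let words := PySem.Chars.split₀ string.toList
  let escaped := words.foldl (fun acc w =>
    acc ++ [w.foldl (fun a ch =>
      a ++ (if PySem.Set.contains (PySem.Set.ofList pvSpecials) ch then ['\\', ch] else [ch])) []]) []
  let res := PySem.Chars.join ['.'] escaped
  match PySem.List.pyGet? res (0 : Int) with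
  | none => ""   -- Python raises IndexError here; excluded by Pre_
  | some c =>
    if PySem.Chars.strIsdigit [c] then
      String.ofList (['\\'] ++ pvHexUpper c.toNat ++ [' '] ++ PySem.List.slice res (some 1) none)
    else String.ofList res

-- ===== PRECONDITION & SPEC =====
-- A (and B) raise IndexError exactly on strings with no non-whitespace character; Pre_ excludes those.
def Pre_stringfy_selector (string : String) : Prop :=
  (string.toList.any (fun c => !PySem.Chars.isspace c)) = true
instance (string : String) : Decidable (Pre_stringfy_selector string) := by
  unfold Pre_stringfy_selector; infer_instance

def pvWitness_stringfy_selector : String := "a b#1"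

def Spec_stringfy_selector (string : String) (out : String) : Prop := out = stringfy_selector_alt string
instance (string : String) (out : String) : Decidable (Spec_stringfy_selector string out) := by unfold Spec_stringfy_selector; infer_instance

-- ===== CLAIM (what is proved, stated in full; the proofs are below) =====
def Claim_equal_stringfy_selector : Prop := ∀ (string : String), Dom_stringfy_selector string → Pre_stringfy_selector string → Spec_stringfy_selector string (stringfy_selector string)

-- ===== LEMMAS AND PROOFS =====

-- per-character escaping with respect to a set S of characters
def escWith (S : List Char) (u : List Char) : List Char :=
  u.flatMap (fun x => if S.contains x then ['\\', x] else [x])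

lemma replace_go_single (c : Char) (new : List Char) :
    ∀ (s acc : List Char) (fuel : Nat), s.length ≤ fuel →
    PySem.Chars.replace.go [c] new fuel s acc
      = acc.reverse ++ s.flatMap (fun x => if x == c then new else [x]) := by
  intro s
  induction s with
  | nil => intro acc fuel _; cases fuel <;> simp [PySem.Chars.replace.go]
  | cons a t ih =>
    intro acc fuel hf
    cases fuel with
    | zero => simp at hf
    | succ f =>
      simp only [PySem.Chars.replace.go]
      by_cases h : a = c
      · subst h
        simp only [List.isPrefixOf, beq_self_eq_true, Bool.true_and, if_pos, List.length_cons,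
          List.length_nil, List.drop_succ_cons, List.drop_zero, List.isPrefixOf_nil_left]
        rw [ih _ f (by simpa using hf)]
        simp
      · have hp : ([c].isPrefixOf (a :: t)) = false := by
          simp [List.isPrefixOf]; exact fun hh => (h hh.symm)
        rw [hp]
        simp only [Bool.false_eq_true, if_false]
        rw [ih _ f (by simpa using hf)]
        simp [h]

lemma replace_single (c : Char) (new s : List Char) :
    PySem.Chars.replace s [c] new = s.flatMap (fun x => if x == c then new else [x]) := by
  unfold PySem.Chars.replace
  simp only [List.isEmpty_cons, Bool.false_eq_true, if_false]
  exact replace_go_single c new s [] s.length (le_refl _)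

lemma replace_single_char (c d : Char) (s : List Char) :
    PySem.Chars.replace s [c] [d] = s.map (fun x => if x == c then d else x) := by
  rw [replace_single]
  induction s with
  | nil => rfl
  | cons a t ih =>
    simp only [List.flatMap_cons, List.map_cons, ih]
    by_cases h : a = c <;> simp [h]

lemma split₀_go_map (g : Char → Char)
    (hg : ∀ c, PySem.Chars.isspace (g c) = PySem.Chars.isspace c ∧
      (PySem.Chars.isspace c = false → g c = c)) :
    ∀ (s cur : List Char) (acc : List (List Char)),
      PySem.Chars.split₀.go (s.map g) cur acc = PySem.Chars.split₀.go s cur acc := by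
  intro s
  induction s with
  | nil => intro cur acc; rfl
  | cons a t ih =>
    intro cur acc
    simp only [List.map_cons, PySem.Chars.split₀.go]
    rw [(hg a).1]
    by_cases h : PySem.Chars.isspace a = true
    · simp [h, ih]
    · simp only [Bool.not_eq_true] at h
      simp [h, (hg a).2 h, ih]

lemma split₀_map (g : Char → Char)
    (hg : ∀ c, PySem.Chars.isspace (g c) = PySem.Chars.isspace c ∧
      (PySem.Chars.isspace c = false → g c = c)) (s : List Char) :
    PySem.Chars.split₀ (s.map g) = PySem.Chars.split₀ s := by
  unfold PySem.Chars.split₀; exact split₀_go_map g hg s [] []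

lemma split₀_go_lstrip :
    ∀ (s : List Char) (acc : List (List Char)),
      PySem.Chars.split₀.go (List.dropWhile PySem.Chars.isspace s) [] acc
        = PySem.Chars.split₀.go s [] acc := by
  intro s
  induction s with
  | nil => intro acc; rfl
  | cons a t ih =>
    intro acc
    by_cases h : PySem.Chars.isspace a = true
    · simp [List.dropWhile, h, PySem.Chars.split₀.go, ih]
    · simp [List.dropWhile, h]

lemma split₀_lstrip (s : List Char) :
    PySem.Chars.split₀ (PySem.Chars.lstrip s) = PySem.Chars.split₀ s := by
  unfold PySem.Chars.split₀ PySem.Chars.lstrip; exact split₀_go_lstrip s []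

lemma split₀_go_all_space :
    ∀ (ws cur : List Char) (acc : List (List Char)), (∀ c ∈ ws, PySem.Chars.isspace c = true) →
      PySem.Chars.split₀.go ws cur acc
        = if cur.isEmpty then acc.reverse else (cur.reverse :: acc).reverse := by
  intro ws
  induction ws with
  | nil => intro cur acc _; rfl
  | cons a t ih =>
    intro cur acc h
    have ha : PySem.Chars.isspace a = true := h a (by simp)
    simp only [PySem.Chars.split₀.go, ha, if_pos]
    by_cases hc : cur.isEmpty = true
    · simp [hc, ih _ _ (fun c hc' => h c (by simp [hc']))]
    · simp [hc, ih _ _ (fun c hc' => h c (by simp [hc']))]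

lemma split₀_go_append_space :
    ∀ (xs ws cur : List Char) (acc : List (List Char)), (∀ c ∈ ws, PySem.Chars.isspace c = true) →
      PySem.Chars.split₀.go (xs ++ ws) cur acc = PySem.Chars.split₀.go xs cur acc := by
  intro xs
  induction xs with
  | nil =>
    intro ws cur acc h
    simp only [List.nil_append]
    rw [split₀_go_all_space ws cur acc h]
    rfl
  | cons a t ih =>
    intro ws cur acc h
    simp only [List.cons_append, PySem.Chars.split₀.go]
    by_cases ha : PySem.Chars.isspace a = true
    · simp [ha, ih _ _ _ h]
    · simp [ha, ih _ _ _ h]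

lemma split₀_rstrip (s : List Char) :
    PySem.Chars.split₀ (PySem.Chars.rstrip s) = PySem.Chars.split₀ s := by
  unfold PySem.Chars.rstrip
  have hdec : s = (List.dropWhile PySem.Chars.isspace s.reverse).reverse
      ++ (List.takeWhile PySem.Chars.isspace s.reverse).reverse := by
    conv_lhs => rw [← List.reverse_reverse s,
      ← List.takeWhile_append_dropWhile (p := PySem.Chars.isspace) (l := s.reverse)]
    rw [List.reverse_append]
  conv_rhs => rw [hdec]
  unfold PySem.Chars.split₀
  rw [split₀_go_append_space]
  intro c hc
  rw [List.mem_reverse] at hc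
  exact List.mem_takeWhile_imp hc

lemma split₀_go_no_space :
    ∀ (s cur : List Char) (acc : List (List Char)),
      (∀ c ∈ cur, PySem.Chars.isspace c = false) →
      (∀ w ∈ acc, ∀ c ∈ w, PySem.Chars.isspace c = false) →
      ∀ w ∈ PySem.Chars.split₀.go s cur acc, ∀ c ∈ w, PySem.Chars.isspace c = false := by
  intro s
  induction s with
  | nil =>
    intro cur acc hcur hacc w hw
    simp only [PySem.Chars.split₀.go] at hw
    by_cases hc : cur.isEmpty = true
    · simp [hc] at hw
      exact hacc w (by simpa using hw)
    · simp [hc] at hw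
      rcases hw with hw | hw
      · exact hacc w (by simpa using hw)
      · subst hw; intro c hcw; exact hcur c (by simpa using hcw)
  | cons a t ih =>
    intro cur acc hcur hacc w hw
    simp only [PySem.Chars.split₀.go] at hw
    by_cases ha : PySem.Chars.isspace a = true
    · simp only [ha, if_pos] at hw
      by_cases hc : cur.isEmpty = true
      · simp only [hc, if_pos] at hw
        exact ih [] acc (by simp) hacc w hw
      · simp only [hc, Bool.false_eq_true, if_false] at hw
        refine ih [] _ (by simp) ?_ w hw
        intro w' hw' c hcw'
        rcases List.mem_cons.mp hw' with hw' | hw'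
        · subst hw'; exact hcur c (by simpa using hcw')
        · exact hacc w' hw' c hcw'
    · simp only [ha, Bool.false_eq_true, if_false] at hw
      refine ih (a :: cur) acc ?_ hacc w hw
      intro c hc
      rcases List.mem_cons.mp hc with hc | hc
      · simpa [hc] using (by simpa using ha : PySem.Chars.isspace a = false)
      · exact hcur c hc

lemma split₀_no_space (s : List Char) :
    ∀ w ∈ PySem.Chars.split₀ s, ∀ c ∈ w, PySem.Chars.isspace c = false := by
  unfold PySem.Chars.split₀
  exact split₀_go_no_space s [] [] (by simp) (by simp)

lemma esc_step (S u : List Char) (c : Char) (hS : c ∉ S) (hb : c ≠ '\\') :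
    PySem.Chars.replace (escWith S u) [c] ['\\', c] = escWith (S ++ [c]) u := by
  rw [replace_single]
  unfold escWith
  rw [List.flatMap_assoc]
  apply List.flatMap_congr
  intro x _
  by_cases hx : x ∈ S
  · have hxc : x ≠ c := fun h => hS (h ▸ hx)
    simp [hx, hxc, Ne.symm hb]
  · by_cases hxc : x = c
    · subst hxc; simp [hx]
    · simp [hx, hxc]

lemma foldl_replace_esc : ∀ (cs : List Char), ∀ (S u : List Char),
    (∀ c ∈ cs, c ∉ S ∧ c ≠ '\\') → cs.Nodup →
    cs.foldl (fun acc c => PySem.Chars.replace acc [c] ['\\', c]) (escWith S u)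
      = escWith (S ++ cs) u := by
  intro cs
  induction cs with
  | nil => intro S u _ _; simp
  | cons c t ih =>
    intro S u h hnd
    simp only [List.foldl_cons]
    rw [esc_step S u c (h c (by simp)).1 (h c (by simp)).2]
    rw [ih (S ++ [c]) u ?_ (by simpa using hnd.of_cons)]
    · simp
    · intro d hd
      refine ⟨?_, (h d (by simp [hd])).2⟩
      intro hmem
      rcases List.mem_append.mp hmem with hm | hm
      · exact (h d (by simp [hd])).1 hm
      · simp at hm
        subst hm
        exact (List.nodup_cons.mp hnd).1 hd

lemma splitOn_go_spaceless (w : List Char) :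
    ∀ (cur : List Char) (acc : List (List Char)) (fuel : Nat), (∀ c ∈ w, c ≠ ' ') → w.length < fuel →
    PySem.Chars.splitOn.go [' '] fuel w cur acc
      = acc.reverse ++ [cur.reverse ++ w] := by
  induction w with
  | nil =>
    intro cur acc fuel _ hf
    cases fuel with
    | zero => omega
    | succ f => simp [PySem.Chars.splitOn.go]
  | cons a t ih =>
    intro cur acc fuel h hf
    cases fuel with
    | zero => omega
    | succ f =>
      have ha : a ≠ ' ' := h a (by simp)
      have hp : ([' '].isPrefixOf (a :: t)) = false := by
        simp [List.isPrefixOf]; exact fun hh => ha hh.symm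
      simp only [PySem.Chars.splitOn.go, hp, Bool.false_eq_true, if_false]
      rw [ih (a :: cur) acc f (fun c hc => h c (by simp [hc])) (by simpa using hf)]
      simp

lemma splitOn_go_spaceless_append (w : List Char) :
    ∀ (rest cur : List Char) (acc : List (List Char)) (fuel : Nat), (∀ c ∈ w, c ≠ ' ') → w.length ≤ fuel →
    PySem.Chars.splitOn.go [' '] fuel (w ++ rest) cur acc
      = PySem.Chars.splitOn.go [' '] (fuel - w.length) rest (w.reverse ++ cur) acc := by
  induction w with
  | nil => intro rest cur acc fuel _ _; simp
  | cons a t ih =>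
    intro rest cur acc fuel h hf
    cases fuel with
    | zero => simp at hf
    | succ f =>
      have ha : a ≠ ' ' := h a (by simp)
      have hp : ([' '].isPrefixOf (a :: (t ++ rest))) = false := by
        simp [List.isPrefixOf]; exact fun hh => ha hh.symm
      simp only [List.cons_append, PySem.Chars.splitOn.go, hp, Bool.false_eq_true, if_false]
      rw [ih rest (a :: cur) acc f (fun c hc => h c (by simp [hc])) (by simpa using hf)]
      simp only [List.length_cons, List.reverse_cons, List.append_assoc, List.singleton_append,
        Nat.succ_sub_succ]

lemma join_cons₂ (sep w w2 : List Char) (ws : List (List Char)) :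
    PySem.Chars.join sep (w :: w2 :: ws) = w ++ sep ++ PySem.Chars.join sep (w2 :: ws) := by
  simp [PySem.Chars.join, List.intercalate, List.intersperse]

lemma join_singleton (sep w : List Char) : PySem.Chars.join sep [w] = w := by
  simp [PySem.Chars.join, List.intercalate, List.intersperse]

lemma splitOn_go_join (ws : List (List Char)) :
    ∀ (acc : List (List Char)) (fuel : Nat), ws ≠ [] → (∀ w ∈ ws, ∀ c ∈ w, c ≠ ' ') →
    (PySem.Chars.join [' '] ws).length < fuel →
    PySem.Chars.splitOn.go [' '] fuel (PySem.Chars.join [' '] ws) [] acc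
      = acc.reverse ++ ws := by
  induction ws with
  | nil => intro acc fuel h; exact absurd rfl h
  | cons w ws ih =>
    intro acc fuel _ h hf
    cases ws with
    | nil =>
      rw [join_singleton] at hf ⊢
      rw [splitOn_go_spaceless w [] acc fuel (h w (by simp)) hf]
      simp
    | cons w2 ws2 =>
      have hjoin : PySem.Chars.join [' '] (w :: w2 :: ws2)
          = w ++ (' ' :: PySem.Chars.join [' '] (w2 :: ws2)) := by
        rw [join_cons₂]; simp
      rw [hjoin] at hf ⊢
      have hlen : w.length ≤ fuel := by simp [List.length_append] at hf; omega
      rw [splitOn_go_spaceless_append w _ [] acc fuel (h w (by simp)) hlen]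
      have hf2 : fuel - w.length ≥ (PySem.Chars.join [' '] (w2 :: ws2)).length + 2 := by
        simp [List.length_append] at hf; omega
      obtain ⟨g, hg⟩ : ∃ g, fuel - w.length = g + 1 := ⟨fuel - w.length - 1, by omega⟩
      rw [hg]
      have hp : ([' '].isPrefixOf (' ' :: PySem.Chars.join [' '] (w2 :: ws2))) = true := by
        simp [List.isPrefixOf]
      simp only [PySem.Chars.splitOn.go, hp, if_pos, List.length_cons, List.length_nil,
        List.drop_succ_cons, List.drop_zero]
      rw [show (w.reverse ++ ([] : List Char)).reverse = w by simp]
      rw [ih (w :: acc) g (by simp) (fun v hv => h v (by simp [hv])) (by omega)]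
      simp

lemma splitOn_join (ws : List (List Char)) (hne : ws ≠ [])
    (hns : ∀ w ∈ ws, ∀ c ∈ w, c ≠ ' ') :
    PySem.Chars.splitOn (PySem.Chars.join [' '] ws) [' '] = ws := by
  unfold PySem.Chars.splitOn
  rw [splitOn_go_join ws [] _ hne hns (by omega)]
  simp

lemma escWith_nil (u : List Char) : escWith [] u = u := by
  simp [escWith]

lemma esc_join (ws : List (List Char)) :
    escWith pvSpecials (PySem.Chars.join [' '] ws)
      = PySem.Chars.join [' '] (ws.map (escWith pvSpecials)) := by
  induction ws with
  | nil => rfl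
  | cons w ws ih =>
    cases ws with
    | nil => simp [join_singleton]
    | cons w2 ws2 =>
      rw [join_cons₂, List.map_cons, List.map_cons, join_cons₂]
      unfold escWith at ih ⊢
      rw [List.flatMap_append, List.flatMap_append, ih]
      simp only [List.flatMap_cons, List.flatMap_nil]
      rw [if_neg (by decide)]
      simp

lemma esc_no_space (w : List Char) (hw : ∀ c ∈ w, PySem.Chars.isspace c = false) :
    ∀ c ∈ escWith pvSpecials w, c ≠ ' ' := by
  intro c hc
  unfold escWith at hc
  rcases List.mem_flatMap.mp hc with ⟨x, hx, hcx⟩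
  have hcases : c = '\\' ∨ c = x := by
    by_cases hxs : pvSpecials.contains x = true
    · rw [if_pos hxs] at hcx
      rcases List.mem_cons.mp hcx with h | h
      · exact Or.inl h
      · exact Or.inr (by simpa using h)
    · rw [if_neg hxs] at hcx
      exact Or.inr (by simpa using hcx)
  rcases hcases with h | h
  · subst h; decide
  · subst h; intro h'; rw [h'] at hx; exact absurd (hw ' ' hx) (by decide)

-- the whole pipeline of A, as a function of the input characters, equals B's pipeline
lemma core (u : List Char) :
    PySem.Chars.join ['.']
      (PySem.Chars.splitOn
        (pvSpecials.foldl (fun acc c => PySem.Chars.replace acc [c] ['\\', c])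
          (PySem.Chars.join [' ']
            (PySem.Chars.split₀
              (PySem.Chars.rstrip (PySem.Chars.lstrip
                (PySem.Chars.replace (PySem.Chars.replace u ['\t'] [' ']) ['\n'] [' ']))))))
        [' '])
      = PySem.Chars.join ['.']
          ((PySem.Chars.split₀ u).map (escWith pvSpecials)) := by
  rw [replace_single_char, replace_single_char, List.map_map]
  rw [split₀_rstrip, split₀_lstrip, split₀_map]
  case hg =>
    intro c
    constructor
    · by_cases h1 : c = '\t'
      · subst h1; decide
      · by_cases h2 : c = '\n'
        · subst h2; decide
        · simp [Function.comp, h1, h2]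
    · intro hns
      have h1 : c ≠ '\t' := by intro h; subst h; exact absurd hns (by decide)
      have h2 : c ≠ '\n' := by intro h; subst h; exact absurd hns (by decide)
      simp [Function.comp, h1, h2]
  rw [show (PySem.Chars.join [' '] (PySem.Chars.split₀ u))
      = escWith [] (PySem.Chars.join [' '] (PySem.Chars.split₀ u)) from (escWith_nil _).symm]
  rw [foldl_replace_esc pvSpecials [] _ (by simp [pvSpecials]) (by simp [pvSpecials])]
  rw [List.nil_append, esc_join]
  cases hws : PySem.Chars.split₀ u with
  | nil => rfl
  | cons w ws =>
    rw [splitOn_join]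
    · simp
    · intro v hv
      rcases List.mem_map.mp hv with ⟨w0, hw0, hvw⟩
      subst hvw
      exact esc_no_space w0 (by rw [← hws] at hw0; exact split₀_no_space u w0 hw0)

lemma alt_escaped (words : List (List Char)) :
    words.foldl (fun acc w =>
      acc ++ [w.foldl (fun a ch =>
        a ++ (if PySem.Set.contains (PySem.Set.ofList pvSpecials) ch then ['\\', ch] else [ch])) []]) []
      = words.map (escWith pvSpecials) := by
  rw [PySem.List.foldl_append_singleton_eq_map]
  rw [List.nil_append]
  apply List.map_congr_left
  intro w _
  rw [PySem.List.foldl_append_eq_flatMap]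
  rw [List.nil_append]
  unfold escWith
  apply List.flatMap_congr
  intro x _
  rw [show PySem.Set.ofList pvSpecials = pvSpecials from by simp [pvSpecials, PySem.Set.ofList, PySem.Set.add, PySem.Set.contains]]
  rfl

-- ===== VERDICT (by name: the statement is the Claim_ definition above) =====
theorem stringfy_selector_spec : Claim_equal_stringfy_selector := by
  intro string _ _
  unfold Spec_stringfy_selector
  simp only [stringfy_selector, stringfy_selector_alt]
  rw [core string.toList, alt_escaped]
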